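-- pv_equiv track=rewrite | github.com/RamanujanMachine/euler2ai | unifier/utils/coboundary_graph_utils.py | reorder_connected_components
-- ===== SOURCE A (Python) =====
-- def reorder_connected_components(ccs):
--     """
--     Reorders the connected components (CCs) based on:
--     1. Size (descending order).
--     2. Grouping by delta, preserving first occurrence order.
--
--     Args:
--         ccs (list of tuples): List of connected components in the form (cc, size, delta).
--
--     Returns:
--         list of tuples: Reordered connected components.
--     """
--     # Step 1: Sort by size in descending order
--     ccs = sorted(ccs, key=lambda x: x[1], reverse=True)  # Sort by size (2nd element in the tuple)
--
--     # Step 2: Reorder based on delta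
--     delta_seen = set()
--     result = []
--
--     for cc, size, delta in ccs:
--         if delta not in delta_seen:
--             # Add all CCs with this delta, preserving order
--             result.extend([item[0] for item in ccs if item[2] == delta])
--             delta_seen.add(delta)
--
--     return result
-- ===== SOURCE B (Python) =====
-- def reorder_connected_components(ccs):
--     # Sort by size descending (stable), then group by delta in one pass
--     # (insertion-ordered dict = first-occurrence order of deltas), then concatenate.
--     ccs = sorted(ccs, key=lambda x: x[1], reverse=True)
--     groups = {}
--     for cc, _size, delta in ccs:
--         groups.setdefault(delta, []).append(cc)
--     out = []
--     for group in groups.values():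
--         out.extend(group)
--     return out
-- ===== Notes on version B (the rewrite author's own statement) =====
-- stated objective: alternative
-- what changed: Replaces A's rescan of the whole sorted list at each newly seen delta (plus a seen-set) with a single grouping pass into an insertion-ordered dict keyed by delta, whose value lists are then concatenated; a timing run did not confirm a speed-up, so none is claimed.
import Mathlib
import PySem

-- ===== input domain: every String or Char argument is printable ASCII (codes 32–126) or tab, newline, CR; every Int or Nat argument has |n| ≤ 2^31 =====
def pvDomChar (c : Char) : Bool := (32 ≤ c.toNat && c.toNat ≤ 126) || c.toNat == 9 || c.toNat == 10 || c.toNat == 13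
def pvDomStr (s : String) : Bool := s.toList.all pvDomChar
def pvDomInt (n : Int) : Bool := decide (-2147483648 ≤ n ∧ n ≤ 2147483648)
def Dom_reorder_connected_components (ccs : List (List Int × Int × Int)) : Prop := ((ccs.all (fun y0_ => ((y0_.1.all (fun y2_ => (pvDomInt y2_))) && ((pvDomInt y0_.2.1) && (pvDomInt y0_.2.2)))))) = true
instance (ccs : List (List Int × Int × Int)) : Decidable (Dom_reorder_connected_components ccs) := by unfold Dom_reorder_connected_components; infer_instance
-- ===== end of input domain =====

-- B groups the size-sorted components by delta in one dict pass instead of A's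
-- rescan of the whole list at each new delta.

-- ===== PORT A =====
def reorder_connected_components (ccs : List (List Int × Int × Int)) : List (List Int) :=
  let ys := PySem.List.sorted ccs (fun x => x.2.1) true
  (ys.foldl
    (fun (st : PySem.Set Int × List (List Int)) p =>
      if PySem.Set.contains st.1 p.2.2 then st
      else (PySem.Set.add st.1 p.2.2,
            st.2 ++ (ys.filter (fun q => q.2.2 == p.2.2)).map (fun q => q.1)))
    (PySem.Set.empty, [])).2

-- ===== PORT B =====
def reorder_connected_components_alt (ccs : List (List Int × Int × Int)) : List (List Int) :=
  let ys := PySem.List.sorted ccs (fun x => x.2.1) true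
  let groups := ys.foldl
    (fun (d : PySem.Dict Int (List (List Int))) p => d.modify p.2.2 [] (fun g => g ++ [p.1]))
    PySem.Dict.empty
  groups.values.foldl (fun (out : List (List Int)) g => out ++ g) []

-- ===== PRECONDITION & SPEC =====
def Spec_reorder_connected_components (ccs : List (List Int × Int × Int)) (out : List (List Int)) : Prop := out = reorder_connected_components_alt ccs
instance (ccs : List (List Int × Int × Int)) (out : List (List Int)) : Decidable (Spec_reorder_connected_components ccs out) := by unfold Spec_reorder_connected_components; infer_instance

-- ===== CLAIM (what is proved, stated in full; the proofs are below) =====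
def Claim_equal_reorder_connected_components : Prop := ∀ (ccs : List (List Int × Int × Int)), Dom_reorder_connected_components ccs → Spec_reorder_connected_components ccs (reorder_connected_components ccs)

-- ===== LEMMAS AND PROOFS =====

-- A's seen-set loop, generalized: it appends g(k) for each FIRST-occurrence key k not already seen.
theorem foldl_seen_loop {α : Type} (key : α → Int) (g : Int → List (List Int)) :
    ∀ (L : List α) (s : PySem.Set Int) (r : List (List Int)),
      L.foldl
        (fun (st : PySem.Set Int × List (List Int)) p =>
          if PySem.Set.contains st.1 (key p) then st
          else (PySem.Set.add st.1 (key p), st.2 ++ g (key p)))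
        (s, r)
      = (PySem.Set.update s (L.map key),
         r ++ (((PySem.Set.ofList (L.map key)).filter
                  (fun δ => !PySem.Set.contains s δ)).map g).flatten) := by
  intro L
  induction L with
  | nil => intro s r; simp [PySem.Set.update]
  | cons p t ih =>
    intro s r
    by_cases h : key p ∈ s
    · have hc : PySem.Set.contains s (key p) = true := by
        simpa using (PySem.Set.contains_iff s (key p)).mpr h
      simp only [List.foldl_cons, hc, if_true, List.map_cons]
      rw [ih s r]
      simp only [Prod.mk.injEq]
      refine ⟨?_, ?_⟩
      · simp [PySem.Set.update_cons, PySem.Set.add_of_mem h]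
      · congr 2
        rw [PySem.Set.ofList_cons]
        unfold PySem.Set.discard
        simp only [List.filter_cons, hc, Bool.not_true, Bool.false_eq_true, if_false,
          List.filter_filter]
        congr 1
        apply List.filter_congr
        intro x hx
        by_cases hxp : x = key p
        · subst hxp; simp [h]
        · simp [hxp]
    · have hc : PySem.Set.contains s (key p) = false := by
        rw [← Bool.not_eq_true]
        intro hcc; exact h ((PySem.Set.contains_iff s (key p)).mp hcc)
      simp only [List.foldl_cons, hc, Bool.false_eq_true, if_false, List.map_cons]
      rw [ih (PySem.Set.add s (key p)) (r ++ g (key p))]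
      simp only [Prod.mk.injEq]
      refine ⟨?_, ?_⟩
      · simp [PySem.Set.update_cons]
      · rw [PySem.Set.ofList_cons]
        unfold PySem.Set.discard
        simp only [List.filter_cons, hc, Bool.not_false, if_true, List.map_cons,
          List.flatten_cons, List.append_assoc, List.filter_filter]
        congr 3
        congr 1
        apply List.filter_congr
        intro x hx
        by_cases hxp : x = key p
        · subst hxp
          simp [PySem.Set.mem_add]
        · have h1 : PySem.Set.contains (PySem.Set.add s (key p)) x
              = PySem.Set.contains s x := by
            by_cases hxs : x ∈ s
            · simp [PySem.Set.mem_add, hxs]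
            · have ha : PySem.Set.contains (PySem.Set.add s (key p)) x = false := by
                rw [← Bool.not_eq_true]
                intro hcc
                rcases (PySem.Set.mem_add _ _ _).mp ((PySem.Set.contains_iff _ _).mp hcc) with h' | h'
                · exact hxs h'
                · exact hxp h'
              have hb : PySem.Set.contains s x = false := by
                rw [← Bool.not_eq_true]
                intro hcc; exact hxs ((PySem.Set.contains_iff _ _).mp hcc)
              rw [ha, hb]
          simp [hxp]

-- ===== VERDICT (by name: the statement is the Claim_ definition above) =====
theorem reorder_connected_components_spec : Claim_equal_reorder_connected_components := by
  intro ccs _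
  unfold Spec_reorder_connected_components reorder_connected_components reorder_connected_components_alt
  set ys := PySem.List.sorted ccs (fun x => x.2.1) true with hys
  dsimp only
  -- A's side via the seen-set lemma
  have hA := foldl_seen_loop (fun p : List Int × Int × Int => p.2.2)
      (fun δ => (ys.filter (fun q => q.2.2 == δ)).map (fun q => q.1)) ys PySem.Set.empty []
  simp only at hA
  rw [hA]
  simp only [PySem.Set.empty]
  -- B's side: turn the dict loop into keyed form and flatten the values
  have hdict :
      ys.foldl (fun (d : PySem.Dict Int (List (List Int))) p => d.modify p.2.2 [] (fun g => g ++ [p.1]))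
        PySem.Dict.empty
      = (ys.map (fun p => (p.2.2, p.1))).foldl
          (fun (d : PySem.Dict Int (List (List Int))) q => d.modify q.1 [] (fun g => g ++ [q.2]))
          PySem.Dict.empty := by
    rw [List.foldl_map]
  rw [hdict]
  set L := ys.map (fun p => (p.2.2, p.1)) with hL
  set d := L.foldl
      (fun (d : PySem.Dict Int (List (List Int))) q => d.modify q.1 [] (fun g => g ++ [q.2]))
      PySem.Dict.empty with hd
  have hnodup : d.keys.Nodup := by
    rw [hd]
    exact PySem.Dict.nodup_keys_foldl_modify_key L (fun q => q.1) [] (fun _ q g => g ++ [q.2])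
      PySem.Dict.empty (by simp)
  have hkeys : d.keys = PySem.Set.ofList (ys.map (fun p => p.2.2)) := by
    rw [hd]
    rw [PySem.Dict.keys_foldl_modify_key]
    simp [hL, PySem.Dict.keys_empty, PySem.Set.update_nil_left, List.map_map, Function.comp_def]
  have hgetD : ∀ δ : Int, d.getD δ [] = (ys.filter (fun q => q.2.2 == δ)).map (fun q => q.1) := by
    intro δ
    rw [hd, PySem.Dict.getD_foldl_modify_append, PySem.Dict.getD_empty]
    rw [hL, List.filter_map, List.map_map]
    simp [Function.comp_def]
  have hvals : d.values = d.keys.map (fun δ => d.getD δ []) :=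
    PySem.Dict.values_eq_map_keys d hnodup []
  have hfold : ∀ (gs : List (List (List Int))) (acc : List (List Int)),
      gs.foldl (fun (out : List (List Int)) g => out ++ g) acc = acc ++ gs.flatten := by
    intro gs
    induction gs with
    | nil => intro acc; simp
    | cons g t ih => intro acc; simp [ih, List.append_assoc]
  rw [hfold, hvals, hkeys]
  have hnil : ∀ (X : List Int), X.filter (fun δ => !PySem.Set.contains [] δ) = X := by
    intro X; simp
  rw [hnil]
  simp only [List.nil_append]
  congr 1
  apply List.map_congr_left
  intro δ _
  exact (hgetD δ).symm
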